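-- pv_equiv track=rewrite | github.com/14Segun88/MOGE_TG_24_03_26 | src/agents/document_analyzer/formal_check_runner.py | _detect_section_from_folder
-- ===== SOURCE A (Python) =====
-- _FOLDER_NUMBER_MAP: dict[str, str] = {
--     "/001": "01.01",  # Пояснительная записка
--     "/002": "02.01",  # СПОЗУ
--     "/003": "03.01",  # АР
--     "/004": "04.01",  # КР
--     "/005": "05.01",  # ИОС
--     "/009": "10.01",  # ПБ (раздел 9 в ЕГРЗ)
--     "/010": "10.01",  # ПБ
--     "/011": "11.01",  # ОДИ
--     "/012": "11.01",  # Смета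
-- }
--
-- def _detect_section_from_folder(full_path_lower: str) -> str:
--     """Определяет код раздела по нумерованной папке в пути.
--
--     Пример: .../1 проектная документация/001 пз/файл.pdf → 01.01
--     Пример: .../Проектная документация/002/спозу.pdf → 02.01
--     """
--     for folder_prefix, code in _FOLDER_NUMBER_MAP.items():
--         # Ищем «/001» или «/001 » или «/001/» или «/001_» в пути
--         if (
--             folder_prefix + "/" in full_path_lower
--             or folder_prefix + " " in full_path_lower
--             or folder_prefix + "_" in full_path_lower
--             or full_path_lower.endswith(folder_prefix)
--         ):
--             return code
--     return ""
-- ===== SOURCE B (Python) =====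
-- _FOLDER_NUMBER_MAP: dict[str, str] = {
--     "/001": "01.01",
--     "/002": "02.01",
--     "/003": "03.01",
--     "/004": "04.01",
--     "/005": "05.01",
--     "/009": "10.01",
--     "/010": "10.01",
--     "/011": "11.01",
--     "/012": "11.01",
-- }
--
-- def _detect_section_from_folder(full_path_lower: str) -> str:
--     # One scan over the path: collect every mapped "/NNN" folder token that is
--     # bounded by '/', ' ', '_' or the end of the string, keep the smallest, look
--     # it up once (the map is in ascending key order, so the smallest present
--     # token is the one the map-order search would pick).
--     n = len(full_path_lower)
--     best = None
--     for i, ch in enumerate(full_path_lower):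
--         if ch == '/':
--             token = full_path_lower[i:i + 4]
--             if token in _FOLDER_NUMBER_MAP and (i + 4 == n or full_path_lower[i + 4] in '/ _'):
--                 if best is None or token < best:
--                     best = token
--     return _FOLDER_NUMBER_MAP[best] if best is not None else ""
-- ===== Notes on version B (the rewrite author's own statement) =====
-- stated objective: alternative
-- what changed: A probes the path four times per map entry (contains prefix+'/', prefix+' ', prefix+'_', endswith); B makes one scan over the path collecting every mapped '/NNN' token that is bounded by '/', ' ', '_' or end-of-string, keeps the smallest token and does a single map lookup (the map is in ascending key order, so the smallest bounded token present is exactly the entry A's map-order loop finds first).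
import Mathlib
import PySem

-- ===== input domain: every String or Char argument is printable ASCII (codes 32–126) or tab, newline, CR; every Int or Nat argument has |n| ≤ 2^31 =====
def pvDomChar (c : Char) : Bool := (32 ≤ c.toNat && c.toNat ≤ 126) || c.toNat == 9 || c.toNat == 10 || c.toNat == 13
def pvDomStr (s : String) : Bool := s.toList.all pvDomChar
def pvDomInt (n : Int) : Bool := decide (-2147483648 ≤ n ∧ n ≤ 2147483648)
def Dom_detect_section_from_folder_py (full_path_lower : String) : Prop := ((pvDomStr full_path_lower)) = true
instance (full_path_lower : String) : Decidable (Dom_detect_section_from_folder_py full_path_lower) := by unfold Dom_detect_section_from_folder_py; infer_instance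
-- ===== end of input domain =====

-- B replaces A's probe-the-string-per-map-entry loop by one scan of the path collecting
-- bounded "/NNN" tokens followed by a single lookup of the smallest; same return value.

-- ===== PORT A =====
-- _FOLDER_NUMBER_MAP, in insertion order, keys as char lists
def pvMapA : List (List Char × String) :=
  [(['/','0','0','1'], "01.01"), (['/','0','0','2'], "02.01"), (['/','0','0','3'], "03.01"),
   (['/','0','0','4'], "04.01"), (['/','0','0','5'], "05.01"), (['/','0','0','9'], "10.01"),
   (['/','0','1','0'], "10.01"), (['/','0','1','1'], "11.01"), (['/','0','1','2'], "11.01")]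

-- A's if-condition: «prefix+"/" in s or prefix+" " in s or prefix+"_" in s or s.endswith(prefix)»
def pvMatchA (k : List Char) (s : List Char) : Bool :=
  PySem.Chars.isIn (k ++ ['/']) s || PySem.Chars.isIn (k ++ [' ']) s ||
  PySem.Chars.isIn (k ++ ['_']) s || PySem.Chars.endswith s k

-- A's for-loop over the map items: first matching entry returns its code, else ""
def pvLoopA : List (List Char × String) → List Char → String
  | [], _ => ""
  | (k, code) :: rest, s => if pvMatchA k s then code else pvLoopA rest s

def detect_section_from_folder_py (full_path_lower : String) : String :=
  pvLoopA pvMapA full_path_lower.toList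

-- ===== PORT B =====
def pvMapB : PySem.Dict (List Char) String := PySem.Dict.mk
  [(['/','0','0','1'], "01.01"), (['/','0','0','2'], "02.01"), (['/','0','0','3'], "03.01"),
   (['/','0','0','4'], "04.01"), (['/','0','0','5'], "05.01"), (['/','0','0','9'], "10.01"),
   (['/','0','1','0'], "10.01"), (['/','0','1','1'], "11.01"), (['/','0','1','2'], "11.01")]

-- «i + 4 == n or full_path_lower[i+4] in '/ _'» on the suffix c :: rest: rest[3]?
-- (exact: the preceding dict-membership test already forces rest.length ≥ 3,
-- so rest[3]? = none exactly when i + 4 == n, mirroring Python's short-circuit)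
def pvBoundary (rest : List Char) : Bool :=
  match rest[3]? with
  | none => true
  | some d => d = '/' || d = ' ' || d = '_'

-- the loop-body test: ch == '/' and token in map and boundary
def pvHitB (c : Char) (rest : List Char) : Bool :=
  c = '/' && (PySem.Dict.get? pvMapB (c :: rest.take 3)).isSome && pvBoundary rest

-- «if best is None or token < best: best = token»
def pvUpd (best : Option (List Char)) (tok : List Char) : Option (List Char) :=
  match best with
  | none => some tok
  | some b => if tok < b then some tok else some b

-- B's forward scan «for i, ch in enumerate(...)» as recursion on the suffix
def pvScanB : List Char → Option (List Char) → Option (List Char)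
  | [], best => best
  | c :: rest, best =>
      pvScanB rest (if pvHitB c rest then pvUpd best (c :: rest.take 3) else best)

-- «_FOLDER_NUMBER_MAP[best] if best is not None else ""» (best, when set, is always a key)
def pvFinish : Option (List Char) → String
  | none => ""
  | some b => PySem.Dict.getD pvMapB b ""

def detect_section_from_folder_py_alt (full_path_lower : String) : String :=
  pvFinish (pvScanB full_path_lower.toList none)

-- ===== PRECONDITION & SPEC =====
def Spec_detect_section_from_folder_py (full_path_lower : String) (out : String) : Prop := out = detect_section_from_folder_py_alt full_path_lower
instance (full_path_lower : String) (out : String) : Decidable (Spec_detect_section_from_folder_py full_path_lower out) := by unfold Spec_detect_section_from_folder_py; infer_instance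

-- ===== CLAIM (what is proved, stated in full; the proofs are below) =====
def Claim_equal_detect_section_from_folder_py : Prop := ∀ (full_path_lower : String), Dom_detect_section_from_folder_py full_path_lower → Spec_detect_section_from_folder_py full_path_lower (detect_section_from_folder_py full_path_lower)

-- ===== LEMMAS AND PROOFS =====

-- proof-side: the list of tokens B's scan hits, in scan order
def pvHits : List Char → List (List Char)
  | [] => []
  | c :: rest => (if pvHitB c rest then [c :: rest.take 3] else []) ++ pvHits rest

theorem pvScanB_eq_foldl (l : List Char) (best : Option (List Char)) :
    pvScanB l best = List.foldl pvUpd best (pvHits l) := by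
  induction l generalizing best with
  | nil => rfl
  | cons c rest ih =>
      simp only [pvScanB, pvHits]
      by_cases h : pvHitB c rest = true
      · simp [h, ih]
      · simp [h, ih]

theorem pvUpd_isSome (acc : Option (List Char)) (t : List Char) : (pvUpd acc t).isSome = true := by
  cases acc with
  | none => rfl
  | some a => simp only [pvUpd]; split <;> rfl

theorem pvUpd_not_lt (acc : Option (List Char)) (t b : List Char) (h : pvUpd acc t = some b) :
    ¬ t < b := by
  cases acc with
  | none => simp [pvUpd] at h; simp [h]
  | some a =>
      simp only [pvUpd] at h
      by_cases hta : t < a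
      · simp [hta] at h; simp [h]
      · simp [hta] at h; subst h; exact hta

theorem pvUpd_acc_not_lt (a t b : List Char) (h : pvUpd (some a) t = some b) : ¬ a < b := by
  simp only [pvUpd] at h
  by_cases hta : t < a
  · simp [hta] at h; subst h; exact fun hab => lt_irrefl a (lt_trans hab hta)
  · simp [hta] at h; simp [h]

theorem pvUpd_mem (acc : Option (List Char)) (t b : List Char) (h : pvUpd acc t = some b) :
    b = t ∨ acc = some b := by
  cases acc with
  | none => simp [pvUpd] at h; simp [h]
  | some a =>
      simp only [pvUpd] at h
      by_cases hta : t < a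
      · simp [hta] at h; simp [h]
      · simp [hta] at h; simp [h]

theorem pvFoldl_none (ts : List (List Char)) :
    List.foldl pvUpd none ts = none ↔ ts = [] := by
  cases ts with
  | nil => simp
  | cons t ts =>
      simp only [List.foldl, pvUpd]
      constructor
      · intro h
        exfalso
        have : (List.foldl pvUpd (some t) ts).isSome = true := by
          clear h
          induction ts generalizing t with
          | nil => rfl
          | cons u us ih =>
              simp only [List.foldl]
              have := pvUpd_isSome (some t) u
              cases hv : pvUpd (some t) u with
              | none => rw [hv] at this; simp at this
              | some v => exact ih v
        rw [h] at this; simp at this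
      · intro h; cases h

theorem pvFoldl_acc (ts : List (List Char)) : ∀ (acc : Option (List Char)) (m : List Char),
    List.foldl pvUpd acc ts = some m →
    (m ∈ ts ∨ acc = some m) ∧ (∀ t ∈ ts, ¬ t < m) ∧ (∀ b, acc = some b → ¬ b < m) := by
  induction ts with
  | nil =>
      intro acc m h
      simp at h
      refine ⟨Or.inr h, by simp, ?_⟩
      intro b hb; rw [h] at hb; simp at hb; simp [hb]
  | cons t ts ih =>
      intro acc m h
      simp only [List.foldl] at h
      obtain ⟨h1, h2, h3⟩ := ih (pvUpd acc t) m h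
      cases hb₀ : pvUpd acc t with
      | none => exact absurd (pvUpd_isSome acc t) (by rw [hb₀]; simp)
      | some b₀ =>
      have hb₀m : ¬ b₀ < m := h3 b₀ hb₀
      have htb₀ : ¬ t < b₀ := pvUpd_not_lt acc t b₀ hb₀
      have htm : ¬ t < m := fun htm =>
        hb₀m (lt_of_le_of_lt (not_lt.1 htb₀) htm)
      refine ⟨?_, ?_, ?_⟩
      · rcases h1 with h1 | h1
        · exact Or.inl (List.mem_cons_of_mem _ h1)
        · have hbm : b₀ = m := by rw [hb₀] at h1; exact Option.some.inj h1
          subst hbm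
          rcases pvUpd_mem acc t b₀ hb₀ with rfl | hacc
          · exact Or.inl List.mem_cons_self
          · exact Or.inr hacc
      · intro u hu
        rcases List.mem_cons.1 hu with rfl | hu
        · exact htm
        · exact h2 u hu
      · intro a ha
        subst ha
        have hab₀ : ¬ a < b₀ := pvUpd_acc_not_lt a t b₀ hb₀
        exact fun ham => hb₀m (lt_of_le_of_lt (not_lt.1 hab₀) ham)

theorem pvFoldl_some (ts : List (List Char)) (m : List Char)
    (h : List.foldl pvUpd none ts = some m) :
    m ∈ ts ∧ ∀ t ∈ ts, ¬ t < m := by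
  obtain ⟨h1, h2, _⟩ := pvFoldl_acc ts none m h
  exact ⟨h1.resolve_right (by simp), h2⟩

-- every hit token is a key of the map
theorem pvHits_mem_keys (s : List Char) (m : List Char) (hm : m ∈ pvHits s) :
    (PySem.Dict.get? pvMapB m).isSome = true := by
  induction s with
  | nil => simp [pvHits] at hm
  | cons c rest ih =>
      simp only [pvHits] at hm
      by_cases h : pvHitB c rest = true
      · simp [h] at hm
        rcases hm with rfl | hm
        · simp only [pvHitB, Bool.and_eq_true] at h; exact h.1.2
        · exact ih hm
      · simp [h] at hm; exact ih hm

theorem pvKey_cases (m : List Char) (h : (PySem.Dict.get? pvMapB m).isSome = true) :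
    m = ['/','0','0','1'] ∨ m = ['/','0','0','2'] ∨ m = ['/','0','0','3'] ∨
    m = ['/','0','0','4'] ∨ m = ['/','0','0','5'] ∨ m = ['/','0','0','9'] ∨
    m = ['/','0','1','0'] ∨ m = ['/','0','1','1'] ∨ m = ['/','0','1','2'] := by
  simp [pvMapB, pvMapA, PySem.Dict.get?] at h
  tauto

-- membership in pvHits as existence of a hit suffix
theorem pvMem_hits_iff (s k : List Char) :
    k ∈ pvHits s ↔ ∃ j c rest, s.drop j = c :: rest ∧ pvHitB c rest = true ∧ c :: rest.take 3 = k := by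
  induction s with
  | nil => simp [pvHits]
  | cons c rest ih =>
      simp only [pvHits]
      constructor
      · intro h
        by_cases hh : pvHitB c rest = true
        · simp [hh] at h
          rcases h with rfl | h
          · exact ⟨0, c, rest, rfl, hh, rfl⟩
          · obtain ⟨j, c', r', hd, hb, ht⟩ := ih.1 h
            exact ⟨j + 1, c', r', by simpa using hd, hb, ht⟩
        · simp [hh] at h
          obtain ⟨j, c', r', hd, hb, ht⟩ := ih.1 h
          exact ⟨j + 1, c', r', by simpa using hd, hb, ht⟩
      · rintro ⟨j, c', r', hd, hb, ht⟩
        cases j with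
        | zero =>
            simp at hd
            obtain ⟨rfl, rfl⟩ := hd
            simp [hb, ht]
        | succ j =>
            simp at hd
            have : k ∈ pvHits rest := ih.2 ⟨j, c', r', hd, hb, ht⟩
            by_cases hh : pvHitB c rest = true <;> simp [hh, this]

-- the per-suffix characterisation of a hit producing the key '/' :: d
theorem pvSuffix_hit_iff (d : List Char) (hd : d.length = 3)
    (hk : (PySem.Dict.get? pvMapB ('/' :: d)).isSome = true) (t : List Char) :
    (∃ c rest, t = c :: rest ∧ pvHitB c rest = true ∧ c :: rest.take 3 = '/' :: d) ↔
      (('/' :: d) ++ ['/'] <+: t ∨ ('/' :: d) ++ [' '] <+: t ∨ ('/' :: d) ++ ['_'] <+: t ∨ t = '/' :: d) := by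
  constructor
  · rintro ⟨c, rest, rfl, hb, ht⟩
    simp at ht
    obtain ⟨rfl, htk⟩ := ht
    have hlen : 3 ≤ rest.length := by
      by_contra hlt
      push_neg at hlt
      have h1 : (rest.take 3).length = rest.length := by simp [List.length_take]; omega
      rw [htk] at h1
      omega
    have hrest : rest = d ++ rest.drop 3 := by
      conv_lhs => rw [← List.take_append_drop 3 rest]
      rw [htk]
    cases hu : rest.drop 3 with
    | nil =>
        right; right; right
        rw [hrest, hu]; simp
    | cons b u =>
        have hb4 : rest[3]? = some b := by
          rw [hrest, hu]
          rw [List.getElem?_append_right (by omega)]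
          simp [hd]
        simp only [pvHitB, pvBoundary, hb4, Bool.and_eq_true] at hb
        have hbc : b = '/' ∨ b = ' ' ∨ b = '_' := by have h2 := hb.2; simp at h2; tauto
        have hpre : ('/' :: d) ++ [b] <+: '/' :: rest := by
          refine ⟨u, ?_⟩
          conv_lhs => rw [show ('/' :: d) ++ [b] ++ u = '/' :: (d ++ b :: u) by simp]
          rw [← hu, ← hrest]
        rcases hbc with rfl | rfl | rfl
        · exact Or.inl hpre
        · exact Or.inr (Or.inl hpre)
        · exact Or.inr (Or.inr (Or.inl hpre))
  · intro h
    have build : ∀ (b : Char), (b = '/' ∨ b = ' ' ∨ b = '_') → ('/' :: d) ++ [b] <+: t →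
        ∃ c rest, t = c :: rest ∧ pvHitB c rest = true ∧ c :: rest.take 3 = '/' :: d := by
      rintro b hbc ⟨u, hu⟩
      have htk : (d ++ b :: u).take 3 = d := by
        rw [List.take_append_of_le_length (by omega)]
        simp [List.take_of_length_le, hd.le]
      have hb4 : (d ++ b :: u)[3]? = some b := by
        rw [List.getElem?_append_right (by omega)]
        simp [hd]
      refine ⟨'/', d ++ b :: u, by simpa using hu.symm, ?_, by rw [htk]⟩
      rcases hbc with rfl | rfl | rfl <;> simp [pvHitB, pvBoundary, htk, hb4, hk]
    rcases h with h | h | h | rfl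
    · exact build '/' (Or.inl rfl) h
    · exact build ' ' (Or.inr (Or.inl rfl)) h
    · exact build '_' (Or.inr (Or.inr rfl)) h
    · refine ⟨'/', d, rfl, ?_, ?_⟩
      · have htk : d.take 3 = d := List.take_of_length_le hd.le
        have hb4 : d[3]? = none := by simp [hd]
        simp [pvHitB, pvBoundary, htk, hb4, hk]
      · rw [List.take_of_length_le hd.le]

-- bridge: A's containment tests for a key ↔ the key is hit by B's scan
theorem pvMatchA_iff_mem_hits (d : List Char) (hd : d.length = 3)
    (hk : (PySem.Dict.get? pvMapB ('/' :: d)).isSome = true) (s : List Char) :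
    pvMatchA ('/' :: d) s = true ↔ ('/' :: d) ∈ pvHits s := by
  rw [pvMem_hits_iff]
  simp only [pvMatchA, Bool.or_eq_true]
  rw [← PySem.Chars.exists_prefix_drop_iff_isIn, ← PySem.Chars.exists_prefix_drop_iff_isIn,
    ← PySem.Chars.exists_prefix_drop_iff_isIn, PySem.Chars.endswith_iff]
  have hsuf : ('/' :: d) <:+ s ↔ ∃ j, s.drop j = '/' :: d := by
    constructor
    · intro h; exact ⟨s.length - ('/' :: d).length, (List.suffix_iff_eq_drop.1 h).symm⟩
    · rintro ⟨j, hj⟩; exact hj ▸ List.drop_suffix _ _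
  rw [hsuf]
  constructor
  · rintro (((⟨j, hj⟩ | ⟨j, hj⟩) | ⟨j, hj⟩) | ⟨j, hj⟩)
    · exact ⟨j, (pvSuffix_hit_iff d hd hk (s.drop j)).2 (Or.inl hj)⟩
    · exact ⟨j, (pvSuffix_hit_iff d hd hk (s.drop j)).2 (Or.inr (Or.inl hj))⟩
    · exact ⟨j, (pvSuffix_hit_iff d hd hk (s.drop j)).2 (Or.inr (Or.inr (Or.inl hj)))⟩
    · exact ⟨j, (pvSuffix_hit_iff d hd hk (s.drop j)).2 (Or.inr (Or.inr (Or.inr hj)))⟩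
  · rintro ⟨j, c, rest, hdr, hb, ht⟩
    rcases (pvSuffix_hit_iff d hd hk (s.drop j)).1 ⟨c, rest, hdr, hb, ht⟩ with h | h | h | h
    · exact Or.inl (Or.inl (Or.inl ⟨j, h⟩))
    · exact Or.inl (Or.inl (Or.inr ⟨j, h⟩))
    · exact Or.inl (Or.inr ⟨j, h⟩)
    · exact Or.inr ⟨j, h⟩


-- once some key is known to be hit and to be forced as the minimum, B returns its code
theorem pvResolveB (l k : List Char)
    (hkmem : k ∈ pvHits l)
    (huniq : ∀ m, (PySem.Dict.get? pvMapB m).isSome = true → m ∈ pvHits l → ¬ k < m → m = k) :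
    pvFinish (List.foldl pvUpd none (pvHits l)) = PySem.Dict.getD pvMapB k "" := by
  cases hr : List.foldl pvUpd none (pvHits l) with
  | none => exact absurd ((pvFoldl_none _).1 hr) (List.ne_nil_of_mem hkmem)
  | some m =>
      obtain ⟨hmem, hbound⟩ := pvFoldl_some _ m hr
      rw [pvFinish, huniq m (pvHits_mem_keys l m hmem) hmem (hbound k hkmem)]

-- ===== VERDICT (by name: the statement is the Claim_ definition above) =====
theorem detect_section_from_folder_py_spec : Claim_equal_detect_section_from_folder_py := by
  intro s _
  unfold Spec_detect_section_from_folder_py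
  unfold detect_section_from_folder_py detect_section_from_folder_py_alt
  rw [pvScanB_eq_foldl]
  set l := s.toList with hl
  have bridge1 : pvMatchA ['/','0','0','1'] l = true ↔ ['/','0','0','1'] ∈ pvHits l :=
    pvMatchA_iff_mem_hits ['0','0','1'] (by decide) (by decide) l
  have bridge2 : pvMatchA ['/','0','0','2'] l = true ↔ ['/','0','0','2'] ∈ pvHits l :=
    pvMatchA_iff_mem_hits ['0','0','2'] (by decide) (by decide) l
  have bridge3 : pvMatchA ['/','0','0','3'] l = true ↔ ['/','0','0','3'] ∈ pvHits l :=
    pvMatchA_iff_mem_hits ['0','0','3'] (by decide) (by decide) l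
  have bridge4 : pvMatchA ['/','0','0','4'] l = true ↔ ['/','0','0','4'] ∈ pvHits l :=
    pvMatchA_iff_mem_hits ['0','0','4'] (by decide) (by decide) l
  have bridge5 : pvMatchA ['/','0','0','5'] l = true ↔ ['/','0','0','5'] ∈ pvHits l :=
    pvMatchA_iff_mem_hits ['0','0','5'] (by decide) (by decide) l
  have bridge6 : pvMatchA ['/','0','0','9'] l = true ↔ ['/','0','0','9'] ∈ pvHits l :=
    pvMatchA_iff_mem_hits ['0','0','9'] (by decide) (by decide) l
  have bridge7 : pvMatchA ['/','0','1','0'] l = true ↔ ['/','0','1','0'] ∈ pvHits l :=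
    pvMatchA_iff_mem_hits ['0','1','0'] (by decide) (by decide) l
  have bridge8 : pvMatchA ['/','0','1','1'] l = true ↔ ['/','0','1','1'] ∈ pvHits l :=
    pvMatchA_iff_mem_hits ['0','1','1'] (by decide) (by decide) l
  have bridge9 : pvMatchA ['/','0','1','2'] l = true ↔ ['/','0','1','2'] ∈ pvHits l :=
    pvMatchA_iff_mem_hits ['0','1','2'] (by decide) (by decide) l
  by_cases hm1 : pvMatchA ['/','0','0','1'] l = true
  · have hk1 : ['/','0','0','1'] ∈ pvHits l := bridge1.1 hm1
    rw [pvResolveB l ['/','0','0','1'] hk1 ?uniq1]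
    · simp [pvLoopA, pvMapA, hm1] <;> decide
    case uniq1 =>
      intro m hkey hmem hnl
      rcases pvKey_cases m hkey with rfl | rfl | rfl | rfl | rfl | rfl | rfl | rfl | rfl
      · rfl
      · exact absurd (by decide) hnl
      · exact absurd (by decide) hnl
      · exact absurd (by decide) hnl
      · exact absurd (by decide) hnl
      · exact absurd (by decide) hnl
      · exact absurd (by decide) hnl
      · exact absurd (by decide) hnl
      · exact absurd (by decide) hnl
  · -- pvMatchA ['/','0','0','1'] is false: fall through to the next map entry
    by_cases hm2 : pvMatchA ['/','0','0','2'] l = true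
    · have hk2 : ['/','0','0','2'] ∈ pvHits l := bridge2.1 hm2
      rw [pvResolveB l ['/','0','0','2'] hk2 ?uniq2]
      · simp [pvLoopA, pvMapA, hm1, hm2] <;> decide
      case uniq2 =>
        intro m hkey hmem hnl
        rcases pvKey_cases m hkey with rfl | rfl | rfl | rfl | rfl | rfl | rfl | rfl | rfl
        · exact absurd (bridge1.2 hmem) hm1
        · rfl
        · exact absurd (by decide) hnl
        · exact absurd (by decide) hnl
        · exact absurd (by decide) hnl
        · exact absurd (by decide) hnl
        · exact absurd (by decide) hnl
        · exact absurd (by decide) hnl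
        · exact absurd (by decide) hnl
    · -- pvMatchA ['/','0','0','2'] is false: fall through to the next map entry
      by_cases hm3 : pvMatchA ['/','0','0','3'] l = true
      · have hk3 : ['/','0','0','3'] ∈ pvHits l := bridge3.1 hm3
        rw [pvResolveB l ['/','0','0','3'] hk3 ?uniq3]
        · simp [pvLoopA, pvMapA, hm1, hm2, hm3] <;> decide
        case uniq3 =>
          intro m hkey hmem hnl
          rcases pvKey_cases m hkey with rfl | rfl | rfl | rfl | rfl | rfl | rfl | rfl | rfl
          · exact absurd (bridge1.2 hmem) hm1
          · exact absurd (bridge2.2 hmem) hm2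
          · rfl
          · exact absurd (by decide) hnl
          · exact absurd (by decide) hnl
          · exact absurd (by decide) hnl
          · exact absurd (by decide) hnl
          · exact absurd (by decide) hnl
          · exact absurd (by decide) hnl
      · -- pvMatchA ['/','0','0','3'] is false: fall through to the next map entry
        by_cases hm4 : pvMatchA ['/','0','0','4'] l = true
        · have hk4 : ['/','0','0','4'] ∈ pvHits l := bridge4.1 hm4
          rw [pvResolveB l ['/','0','0','4'] hk4 ?uniq4]
          · simp [pvLoopA, pvMapA, hm1, hm2, hm3, hm4] <;> decide
          case uniq4 =>
            intro m hkey hmem hnl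
            rcases pvKey_cases m hkey with rfl | rfl | rfl | rfl | rfl | rfl | rfl | rfl | rfl
            · exact absurd (bridge1.2 hmem) hm1
            · exact absurd (bridge2.2 hmem) hm2
            · exact absurd (bridge3.2 hmem) hm3
            · rfl
            · exact absurd (by decide) hnl
            · exact absurd (by decide) hnl
            · exact absurd (by decide) hnl
            · exact absurd (by decide) hnl
            · exact absurd (by decide) hnl
        · -- pvMatchA ['/','0','0','4'] is false: fall through to the next map entry
          by_cases hm5 : pvMatchA ['/','0','0','5'] l = true
          · have hk5 : ['/','0','0','5'] ∈ pvHits l := bridge5.1 hm5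
            rw [pvResolveB l ['/','0','0','5'] hk5 ?uniq5]
            · simp [pvLoopA, pvMapA, hm1, hm2, hm3, hm4, hm5] <;> decide
            case uniq5 =>
              intro m hkey hmem hnl
              rcases pvKey_cases m hkey with rfl | rfl | rfl | rfl | rfl | rfl | rfl | rfl | rfl
              · exact absurd (bridge1.2 hmem) hm1
              · exact absurd (bridge2.2 hmem) hm2
              · exact absurd (bridge3.2 hmem) hm3
              · exact absurd (bridge4.2 hmem) hm4
              · rfl
              · exact absurd (by decide) hnl
              · exact absurd (by decide) hnl
              · exact absurd (by decide) hnl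
              · exact absurd (by decide) hnl
          · -- pvMatchA ['/','0','0','5'] is false: fall through to the next map entry
            by_cases hm6 : pvMatchA ['/','0','0','9'] l = true
            · have hk6 : ['/','0','0','9'] ∈ pvHits l := bridge6.1 hm6
              rw [pvResolveB l ['/','0','0','9'] hk6 ?uniq6]
              · simp [pvLoopA, pvMapA, hm1, hm2, hm3, hm4, hm5, hm6] <;> decide
              case uniq6 =>
                intro m hkey hmem hnl
                rcases pvKey_cases m hkey with rfl | rfl | rfl | rfl | rfl | rfl | rfl | rfl | rfl
                · exact absurd (bridge1.2 hmem) hm1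
                · exact absurd (bridge2.2 hmem) hm2
                · exact absurd (bridge3.2 hmem) hm3
                · exact absurd (bridge4.2 hmem) hm4
                · exact absurd (bridge5.2 hmem) hm5
                · rfl
                · exact absurd (by decide) hnl
                · exact absurd (by decide) hnl
                · exact absurd (by decide) hnl
            · -- pvMatchA ['/','0','0','9'] is false: fall through to the next map entry
              by_cases hm7 : pvMatchA ['/','0','1','0'] l = true
              · have hk7 : ['/','0','1','0'] ∈ pvHits l := bridge7.1 hm7
                rw [pvResolveB l ['/','0','1','0'] hk7 ?uniq7]
                · simp [pvLoopA, pvMapA, hm1, hm2, hm3, hm4, hm5, hm6, hm7] <;> decide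
                case uniq7 =>
                  intro m hkey hmem hnl
                  rcases pvKey_cases m hkey with rfl | rfl | rfl | rfl | rfl | rfl | rfl | rfl | rfl
                  · exact absurd (bridge1.2 hmem) hm1
                  · exact absurd (bridge2.2 hmem) hm2
                  · exact absurd (bridge3.2 hmem) hm3
                  · exact absurd (bridge4.2 hmem) hm4
                  · exact absurd (bridge5.2 hmem) hm5
                  · exact absurd (bridge6.2 hmem) hm6
                  · rfl
                  · exact absurd (by decide) hnl
                  · exact absurd (by decide) hnl
              · -- pvMatchA ['/','0','1','0'] is false: fall through to the next map entry
                by_cases hm8 : pvMatchA ['/','0','1','1'] l = true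
                · have hk8 : ['/','0','1','1'] ∈ pvHits l := bridge8.1 hm8
                  rw [pvResolveB l ['/','0','1','1'] hk8 ?uniq8]
                  · simp [pvLoopA, pvMapA, hm1, hm2, hm3, hm4, hm5, hm6, hm7, hm8] <;> decide
                  case uniq8 =>
                    intro m hkey hmem hnl
                    rcases pvKey_cases m hkey with rfl | rfl | rfl | rfl | rfl | rfl | rfl | rfl | rfl
                    · exact absurd (bridge1.2 hmem) hm1
                    · exact absurd (bridge2.2 hmem) hm2
                    · exact absurd (bridge3.2 hmem) hm3
                    · exact absurd (bridge4.2 hmem) hm4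
                    · exact absurd (bridge5.2 hmem) hm5
                    · exact absurd (bridge6.2 hmem) hm6
                    · exact absurd (bridge7.2 hmem) hm7
                    · rfl
                    · exact absurd (by decide) hnl
                · -- pvMatchA ['/','0','1','1'] is false: fall through to the next map entry
                  by_cases hm9 : pvMatchA ['/','0','1','2'] l = true
                  · have hk9 : ['/','0','1','2'] ∈ pvHits l := bridge9.1 hm9
                    rw [pvResolveB l ['/','0','1','2'] hk9 ?uniq9]
                    · simp [pvLoopA, pvMapA, hm1, hm2, hm3, hm4, hm5, hm6, hm7, hm8, hm9] <;> decide
                    case uniq9 =>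
                      intro m hkey hmem hnl
                      rcases pvKey_cases m hkey with rfl | rfl | rfl | rfl | rfl | rfl | rfl | rfl | rfl
                      · exact absurd (bridge1.2 hmem) hm1
                      · exact absurd (bridge2.2 hmem) hm2
                      · exact absurd (bridge3.2 hmem) hm3
                      · exact absurd (bridge4.2 hmem) hm4
                      · exact absurd (bridge5.2 hmem) hm5
                      · exact absurd (bridge6.2 hmem) hm6
                      · exact absurd (bridge7.2 hmem) hm7
                      · exact absurd (bridge8.2 hmem) hm8
                      · rfl
                  · -- pvMatchA ['/','0','1','2'] is false: fall through to the next map entry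
                    have hnil : pvHits l = [] := by
                      rcases hH : pvHits l with _ | ⟨x, xs⟩
                      · rfl
                      · exfalso
                        have hx : x ∈ pvHits l := hH ▸ List.mem_cons_self
                        rcases pvKey_cases x (pvHits_mem_keys l x hx) with rfl | rfl | rfl | rfl | rfl | rfl | rfl | rfl | rfl
                        · exact absurd (bridge1.2 hx) hm1
                        · exact absurd (bridge2.2 hx) hm2
                        · exact absurd (bridge3.2 hx) hm3
                        · exact absurd (bridge4.2 hx) hm4
                        · exact absurd (bridge5.2 hx) hm5
                        · exact absurd (bridge6.2 hx) hm6
                        · exact absurd (bridge7.2 hx) hm7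
                        · exact absurd (bridge8.2 hx) hm8
                        · exact absurd (bridge9.2 hx) hm9
                    rw [hnil]
                    simp [pvLoopA, pvMapA, pvFinish, hm1, hm2, hm3, hm4, hm5, hm6, hm7, hm8, hm9]
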